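-- pv_equiv track=rewrite | github.com/hu-zza/uBot_firmware | modules/ubot_data.py | extractIntTupleFromString
-- ===== SOURCE A (Python) =====
-- def extractIntTupleFromString(tupleString: str, limit: int = -1) -> tuple:
--     result  = []
--     current = 0
--     unsaved = False
--     tupleString = str(tupleString)
--
--     for char in tupleString:
--         if char.isdigit():
--             current *= 10
--             current += int(char)
--             unsaved = True
--         elif unsaved:
--             result.append(current)
--             current = 0
--             unsaved = False
--             if len(result) == limit:
--                 break
--
--     if unsaved:
--         result.append(current)
--
--     return tuple(result)
-- ===== SOURCE B (Python) =====
-- def extractIntTupleFromString(tupleString: str, limit: int = -1) -> tuple: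
--     s = str(tupleString)
--     n = len(s)
--     nums = []
--     i = 0
--     while i < n:
--         if s[i].isdigit():
--             j = i
--             while j < n and s[j].isdigit():
--                 j += 1
--             nums.append(int(s[i:j]))
--             i = j
--         else:
--             i += 1
--     return tuple(nums if limit <= 0 else nums[:limit])
-- ===== Notes on version B (the rewrite author's own statement) =====
-- stated objective: alternative
-- what changed: Replaced A's character-by-character accumulator state machine with its mid-loop break on the limit by a span-based tokenizer (scan each maximal digit run, convert it with int() at once) followed by a single slice applying the limit only when it is positive.
import Mathlib
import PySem

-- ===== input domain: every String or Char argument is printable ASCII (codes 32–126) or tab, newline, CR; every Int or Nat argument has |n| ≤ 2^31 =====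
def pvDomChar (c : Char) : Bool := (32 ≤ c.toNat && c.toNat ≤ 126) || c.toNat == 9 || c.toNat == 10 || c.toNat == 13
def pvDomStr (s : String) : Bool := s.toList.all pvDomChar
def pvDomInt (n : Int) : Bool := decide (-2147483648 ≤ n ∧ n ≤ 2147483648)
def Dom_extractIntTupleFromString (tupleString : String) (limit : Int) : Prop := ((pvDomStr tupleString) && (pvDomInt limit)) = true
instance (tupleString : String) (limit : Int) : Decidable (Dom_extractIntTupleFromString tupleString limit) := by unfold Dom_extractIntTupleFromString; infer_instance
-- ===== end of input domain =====

-- B replaces A's one-pass accumulator state machine (with its mid-loop `break` on the limit)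
-- by a span-based tokenizer (scan to the end of each digit run, convert the run at once)
-- followed by a single slice for the limit; objective: alternative decomposition, same cost.

-- ===== PORT A =====
-- Python char.isdigit(), exact on the ASCII domain (codes 32–126 plus tab/newline/CR).
def pvIsDig (c : Char) : Bool := c.isDigit

-- the for-loop of A: state (result, current, unsaved); `break` returns immediately
def pvAloop (limit : Int) : List Char → List Int → Int → Bool → List Int
  | [], res, cur, unsaved => if unsaved then res ++ [cur] else res
  | c :: cs, res, cur, unsaved =>
    if pvIsDig c then
      pvAloop limit cs res (cur * 10 + ((c.toNat : Int) - 48)) true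
    else if unsaved then
      let res' := res ++ [cur]
      if (res'.length : Int) = limit then res'
      else pvAloop limit cs res' 0 false
    else
      pvAloop limit cs res cur unsaved

def extractIntTupleFromString (tupleString : String) (limit : Int) : List Int :=
  pvAloop limit tupleString.toList [] 0 false

-- ===== PORT B =====
-- int(run) for an all-digit run: hand port of Python int(); exact because the run
-- consists only of ASCII digits (no sign/whitespace/underscore cases can occur).
def pvIntOfRun (ds : List Char) : Int :=
  ds.foldl (fun a c => a * 10 + ((c.toNat : Int) - 48)) 0

-- the outer while-loop of B: at a digit, scan the whole run (inner while) and jump past it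
def pvBscan : List Char → List Int
  | [] => []
  | c :: cs =>
    if pvIsDig c then
      pvIntOfRun ((c :: cs).takeWhile pvIsDig) :: pvBscan ((c :: cs).dropWhile pvIsDig)
    else pvBscan cs
termination_by l => l.length
decreasing_by
  · simp only [List.dropWhile_cons_of_pos ‹pvIsDig c = true›, List.length_cons]
    exact Nat.lt_succ_of_le (List.length_dropWhile_le _ _)
  · simp

def extractIntTupleFromString_alt (tupleString : String) (limit : Int) : List Int :=
  let nums := pvBscan tupleString.toList
  if limit ≤ 0 then nums else nums.take limit.toNat

-- ===== PRECONDITION & SPEC =====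
def Spec_extractIntTupleFromString (tupleString : String) (limit : Int) (out : List Int) : Prop := out = extractIntTupleFromString_alt tupleString limit
instance (tupleString : String) (limit : Int) (out : List Int) : Decidable (Spec_extractIntTupleFromString tupleString limit out) := by unfold Spec_extractIntTupleFromString; infer_instance

-- ===== CLAIM (what is proved, stated in full; the proofs are below) =====
def Claim_equal_extractIntTupleFromString : Prop := ∀ (tupleString : String) (limit : Int), Dom_extractIntTupleFromString tupleString limit → Spec_extractIntTupleFromString tupleString limit (extractIntTupleFromString tupleString limit)

-- ===== LEMMAS AND PROOFS =====

-- canonical token list of a char list (proof-side characterisation of both programs)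
mutual
def pvToksC (cur : Int) : List Char → List Int
  | [] => [cur]
  | c :: cs => if pvIsDig c then pvToksC (cur * 10 + ((c.toNat : Int) - 48)) cs else cur :: pvToks cs
def pvToks : List Char → List Int
  | [] => []
  | c :: cs => if pvIsDig c then pvToksC ((c.toNat : Int) - 48) cs else pvToks cs
end

lemma pvToksC_span (cs : List Char) : ∀ cur : Int,
    pvToksC cur cs =
      (cs.takeWhile pvIsDig).foldl (fun a c => a * 10 + ((c.toNat : Int) - 48)) cur
        :: pvToks (cs.dropWhile pvIsDig) := by
  induction cs with
  | nil => intro cur; simp [pvToksC, pvToks]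
  | cons c cs ih =>
    intro cur
    by_cases h : pvIsDig c = true
    · simp [pvToksC, h, List.takeWhile_cons_of_pos, List.dropWhile_cons_of_pos, ih]
    · rw [pvToksC, List.takeWhile_cons_of_neg (by simp [h]), List.dropWhile_cons_of_neg (by simp [h])]
      simp only [h, if_false, Bool.false_eq_true, List.foldl_nil]
      conv_rhs => rw [pvToks.eq_def]
      simp [h]

lemma pvBscan_eq_pvToks (cs : List Char) : pvBscan cs = pvToks cs := by
  induction hn : cs.length using Nat.strong_induction_on generalizing cs with
  | _ n ih =>
    match cs with
    | [] => simp [pvBscan, pvToks]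
    | c :: cs =>
      by_cases h : pvIsDig c = true
      · rw [pvBscan, pvToks]
        simp only [h, if_true, pvIntOfRun]
        rw [List.takeWhile_cons_of_pos h, List.dropWhile_cons_of_pos h, pvToksC_span]
        have hlt : (cs.dropWhile pvIsDig).length < n := by
          subst hn; simp only [List.length_cons]
          exact Nat.lt_succ_of_le (List.length_dropWhile_le _ _)
        rw [ih _ hlt _ rfl]
        simp [List.foldl]
      · rw [pvBscan, pvToks]
        simp only [h, if_false, Bool.false_eq_true]
        exact ih cs.length (by subst hn; simp) cs rfl

-- the limit-truncation both programs perform, parameterised by how many ints are already saved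
def pvTrunc (limit : Int) (n : Nat) (l : List Int) : List Int :=
  if 0 < limit then l.take (limit - n).toNat else l

lemma pvAloop_toks (limit : Int) (cs : List Char) :
    (∀ (res : List Int) (cur : Int), (0 < limit → (res.length : Int) < limit) →
        pvAloop limit cs res cur true = res ++ pvTrunc limit res.length (pvToksC cur cs)) ∧
    (∀ res : List Int, (0 < limit → (res.length : Int) < limit) →
        pvAloop limit cs res 0 false = res ++ pvTrunc limit res.length (pvToks cs)) := by
  induction cs with
  | nil =>
    constructor
    · intro res cur hres
      have hA : pvAloop limit [] res cur true = res ++ [cur] := by simp [pvAloop]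
      rw [hA, pvToksC, pvTrunc]
      split_ifs with hl
      · have h1 : (1 : Nat) ≤ (limit - res.length).toNat := by
          have := hres hl; omega
        rw [List.take_of_length_le (by simpa using h1)]
      · rfl
    · intro res hres
      simp [pvAloop, pvToks, pvTrunc]
  | cons c cs ih =>
    constructor
    · intro res cur hres
      by_cases h : pvIsDig c = true
      · rw [pvAloop, pvToksC]
        simp only [h, if_true]
        exact ih.1 res _ hres
      · rw [pvAloop, pvToksC]
        simp only [h, if_false, if_true, Bool.false_eq_true]
        by_cases hstop : ((res ++ [cur]).length : Int) = limit
        · simp only [hstop, if_true]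
          have hl : 0 < limit := by simp at hstop; omega
          simp only [pvTrunc, hl, if_true]
          have h1 : (limit - res.length).toNat = 1 := by simp at hstop; omega
          simp [h1]
        · simp only [hstop, if_false]
          have hres' : 0 < limit → (((res ++ [cur]).length : Int)) < limit := by
            intro hl; have := hres hl; simp at hstop ⊢; omega
          rw [ih.2 (res ++ [cur]) hres']
          simp only [pvTrunc]
          split_ifs with hl
          · have hk : (limit - res.length).toNat = (limit - (res ++ [cur]).length).toNat + 1 := by
              have := hres hl; simp; omega
            simp [hk, List.take_succ_cons]
          · simp
    · intro res hres
      by_cases h : pvIsDig c = true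
      · rw [pvAloop, pvToks]
        simp only [h, if_true]
        have := ih.1 res (0 * 10 + ((c.toNat : Int) - 48)) hres
        rw [this]; norm_num
      · rw [pvAloop, pvToks]
        simp only [h, if_false, Bool.false_eq_true]
        exact ih.2 res hres

-- ===== VERDICT (by name: the statement is the Claim_ definition above) =====
theorem extractIntTupleFromString_spec : Claim_equal_extractIntTupleFromString := by
  intro s limit _
  unfold Spec_extractIntTupleFromString extractIntTupleFromString extractIntTupleFromString_alt
  rw [(pvAloop_toks limit s.toList).2 [] (by intro h; simpa using h)]
  rw [pvBscan_eq_pvToks]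
  simp only [List.nil_append, pvTrunc, List.length_nil, Nat.cast_zero, Int.sub_zero]
  split_ifs with h1 h2
  · omega
  · rfl
  · rfl
  · omega
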